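-- pv_equiv track=rewrite | github.com/NielsdaWheelz/ariel | src/ariel/memory.py | _memory_key
-- ===== SOURCE A (Python) =====
-- def _memory_key(value: str) -> str:
--     pieces: list[str] = []
--     last_was_separator = False
--     for char in value.strip().lower():
--         if char.isalnum():
--             pieces.append(char)
--             last_was_separator = False
--         elif not last_was_separator:
--             pieces.append("_")
--             last_was_separator = True
--     return "".join(pieces).strip("_") or "general"
-- ===== SOURCE B (Python) =====
-- def _memory_key(value: str) -> str:
--     s = value.strip().lower()
--     tokens = []
--     i = 0
--     n = len(s)
--     while i < n:
--         if s[i].isalnum():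
--             j = i
--             while j < n and s[j].isalnum():
--                 j += 1
--             tokens.append(s[i:j])
--             i = j
--         else:
--             i += 1
--     return '_'.join(tokens) or 'general'
-- ===== Notes on version B (the rewrite author's own statement) =====
-- stated objective: idiomatic
-- what changed: Replaced the char-by-char loop with a last_was_separator flag and a final strip('_') by a tokenize-then-join pass: scan out the maximal alnum runs as tokens and return '_'.join(tokens) or 'general', so no separator flag and no post-strip are needed.
import Mathlib
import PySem

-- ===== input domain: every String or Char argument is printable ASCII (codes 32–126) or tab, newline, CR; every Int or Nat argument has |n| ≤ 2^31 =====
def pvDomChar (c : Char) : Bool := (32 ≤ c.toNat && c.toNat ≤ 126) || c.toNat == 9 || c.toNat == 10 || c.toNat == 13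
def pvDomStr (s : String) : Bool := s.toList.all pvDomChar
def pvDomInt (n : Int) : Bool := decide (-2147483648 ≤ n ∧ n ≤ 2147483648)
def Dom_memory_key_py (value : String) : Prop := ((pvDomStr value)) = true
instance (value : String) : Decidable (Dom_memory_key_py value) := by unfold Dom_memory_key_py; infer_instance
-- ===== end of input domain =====

-- B tokenizes the maximal alnum runs and joins them with '_', instead of A's separator-flag loop plus strip('_'); same result, no speed claim.

-- ===== PORT A =====
def memory_key_py (value : String) : String :=
  let st := (PySem.Chars.lower (PySem.Chars.strip value.toList)).foldl
    (fun (st : List Char × Bool) char =>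
      if PySem.Chars.isalnum char then (st.1 ++ [char], false)
      else if st.2 = false then (st.1 ++ ['_'], true) else st)
    ([], false)
  let r := PySem.Chars.stripChars st.1 ['_']
  if r = [] then "general" else String.ofList r

-- ===== PORT B =====
-- B's outer while-loop: at an alnum char take the whole maximal alnum run as a token, else skip one char.
def altTokens (s : List Char) : List (List Char) :=
  match s with
  | [] => []
  | c :: cs =>
    if PySem.Chars.isalnum c then
      (c :: cs.takeWhile PySem.Chars.isalnum) :: altTokens (cs.dropWhile PySem.Chars.isalnum)
    else altTokens cs
termination_by s.length
decreasing_by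
  · have := List.length_dropWhile_le PySem.Chars.isalnum cs
    simp; omega
  · simp

def memory_key_py_alt (value : String) : String :=
  let s := PySem.Chars.lower (PySem.Chars.strip value.toList)
  let r := PySem.Chars.join ['_'] (altTokens s)
  if r = [] then "general" else String.ofList r

-- ===== PRECONDITION & SPEC =====
def Spec_memory_key_py (value : String) (out : String) : Prop := out = memory_key_py_alt value
instance (value : String) (out : String) : Decidable (Spec_memory_key_py value out) := by unfold Spec_memory_key_py; infer_instance

-- ===== CLAIM (what is proved, stated in full; the proofs are below) =====
def Claim_equal_memory_key_py : Prop := ∀ (value : String), Dom_memory_key_py value → Spec_memory_key_py value (memory_key_py value)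

-- ===== LEMMAS AND PROOFS =====

-- A's loop body, accumulator factored out: the characters A appends while scanning l with flag b.
def aRest (b : Bool) : List Char → List Char
  | [] => []
  | c :: cs =>
    if PySem.Chars.isalnum c then c :: aRest false cs
    else if b then aRest true cs else '_' :: aRest true cs

theorem foldl_aRest (l : List Char) (acc : List Char) (b : Bool) :
    (l.foldl
      (fun (st : List Char × Bool) char =>
        if PySem.Chars.isalnum char then (st.1 ++ [char], false)
        else if st.2 = false then (st.1 ++ ['_'], true) else st)
      (acc, b)).1 = acc ++ aRest b l := by
  induction l generalizing acc b with
  | nil => simp [aRest]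
  | cons c cs ih =>
    by_cases h : PySem.Chars.isalnum c
    · simp [aRest, h, ih]
    · cases b <;> simp [aRest, h, ih]

theorem dropU_aRest (l : List Char) :
    List.dropWhile (fun c => List.contains ['_'] c) (aRest true l) =
    List.dropWhile (fun c => List.contains ['_'] c) (aRest false l) := by
  induction l with
  | nil => rfl
  | cons c cs ih =>
    by_cases h : PySem.Chars.isalnum c
    · simp [aRest, h]
    · simp only [aRest, h, if_false, Bool.false_eq_true, if_true]
      rw [List.dropWhile_cons]
      simp

theorem dropU_aRest_true (l : List Char) :
    List.dropWhile (fun c => List.contains ['_'] c) (aRest true l) = aRest true l := by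
  induction l with
  | nil => rfl
  | cons c cs ih =>
    by_cases h : PySem.Chars.isalnum c
    · have hne : ¬ c = '_' := by
        intro hc; subst hc; exact absurd h (by decide)
      simp only [aRest, h, if_true]
      rw [List.dropWhile_cons]
      simp [hne]
    · simpa [aRest, h] using ih

-- rstrip of underscores, as used inside stripChars
def rstripU (x : List Char) : List Char :=
  (List.dropWhile (fun c => List.contains ['_'] c) x.reverse).reverse

theorem rstripU_cons_underscore (x : List Char) :
    rstripU ('_' :: x) = if rstripU x = [] then [] else '_' :: rstripU x := by
  unfold rstripU
  rw [List.reverse_cons, List.dropWhile_append]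
  by_cases h : List.dropWhile (fun c => List.contains ['_'] c) x.reverse = []
  · rw [h]
    simp
  · have h' : ¬ ∀ y ∈ x, y = '_' := by
      simp only [List.dropWhile_eq_nil_iff, List.mem_reverse] at h
      simpa using h
    simp [h']

theorem rstripU_alnum_prepend (t x : List Char) (ht : t ≠ []) (hall : ∀ c ∈ t, PySem.Chars.isalnum c = true) :
    rstripU (t ++ x) = t ++ rstripU x := by
  unfold rstripU
  rw [List.reverse_append, List.dropWhile_append]
  have hlast : ∃ d r, t.reverse = d :: r ∧ PySem.Chars.isalnum d = true := by
    cases h : t.reverse with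
    | nil => exact absurd (by simpa using h) ht
    | cons d r =>
      refine ⟨d, r, rfl, hall d ?_⟩
      have : d ∈ t.reverse := by rw [h]; exact List.mem_cons_self
      simpa using this
  obtain ⟨d, r, hrev, hd⟩ := hlast
  have hne : (d == '_') = false := by
    by_contra hc
    simp at hc
    subst hc
    exact absurd hd (by decide)
  have hne' : ¬ d = '_' := by intro hc; subst hc; exact absurd hd (by decide)
  have hdw : List.dropWhile (fun c => decide (c = '_')) t.reverse = t.reverse := by
    rw [hrev, List.dropWhile_cons]
    simp [hne']
  by_cases h : List.dropWhile (fun c => List.contains ['_'] c) x.reverse = []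
  · rw [h]
    simp [hdw]
  · have h' : ¬ ∀ y ∈ x, y = '_' := by
      simp only [List.dropWhile_eq_nil_iff, List.mem_reverse] at h
      simpa using h
    simp [h']

theorem aRest_alnum_run (t u : List Char) (hall : ∀ c ∈ t, PySem.Chars.isalnum c = true)
    (b : Bool) (ht : t ≠ []) : aRest b (t ++ u) = t ++ aRest false u := by
  induction t generalizing b with
  | nil => exact absurd rfl ht
  | cons c cs ih =>
    have hc : PySem.Chars.isalnum c = true := hall c List.mem_cons_self
    cases hcs : cs with
    | nil => simp [aRest, hc]
    | cons d ds =>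
      subst hcs
      have h2 : aRest false ((d :: ds) ++ u) = (d :: ds) ++ aRest false u := by
        exact ih (fun x hx => hall x (List.mem_cons_of_mem _ hx)) false (by simp)
      calc aRest b ((c :: d :: ds) ++ u) = c :: aRest false ((d :: ds) ++ u) := by
            simp [aRest, hc]
        _ = (c :: d :: ds) ++ aRest false u := by rw [h2]; rfl

theorem altTokens_mem_ne_nil (l : List Char) (t : List Char) (ht : t ∈ altTokens l) : t ≠ [] := by
  induction l using altTokens.induct with
  | case1 => simp [altTokens] at ht
  | case2 c cs h ih =>
    rw [altTokens] at ht
    simp [h] at ht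
    rcases ht with ht | ht
    · subst ht; simp
    · exact ih ht
  | case3 c cs h ih =>
    rw [altTokens] at ht
    simp [h] at ht
    exact ih ht

theorem join_cons (a : List Char) (rest : List (List Char)) :
    PySem.Chars.join ['_'] (a :: rest) =
      a ++ (if rest = [] then [] else '_' :: PySem.Chars.join ['_'] rest) := by
  cases rest with
  | nil => simp [PySem.Chars.join, List.intercalate]
  | cons b bs => simp [PySem.Chars.join, List.intercalate]

theorem join_eq_nil_iff (l : List Char) :
    (PySem.Chars.join ['_'] (altTokens l) = []) ↔ altTokens l = [] := by
  constructor
  · intro h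
    cases htk : altTokens l with
    | nil => rfl
    | cons a rest =>
      rw [htk, join_cons] at h
      have ha : a = [] := by
        rcases List.append_eq_nil_iff.mp h with ⟨h1, _⟩
        exact h1
      exact absurd ha (altTokens_mem_ne_nil l a (by rw [htk]; exact List.mem_cons_self))
  · intro h; rw [h]; simp [PySem.Chars.join, List.intercalate]

-- head of l is not alnum (or l empty)
def headNotAlnum (l : List Char) : Prop :=
  match l with
  | [] => True
  | c :: _ => PySem.Chars.isalnum c = false

theorem main_aux (n : Nat) : ∀ l : List Char, l.length ≤ n →
    (rstripU (aRest true l) = PySem.Chars.join ['_'] (altTokens l)) ∧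
    (headNotAlnum l →
      rstripU (aRest false l) =
        (if altTokens l = [] then [] else '_' :: PySem.Chars.join ['_'] (altTokens l))) := by
  induction n with
  | zero =>
    intro l hl
    have : l = [] := List.eq_nil_of_length_eq_zero (Nat.le_zero.mp hl)
    subst this
    constructor
    · simp [aRest, rstripU, altTokens, PySem.Chars.join, List.intercalate]
    · intro _; simp [aRest, rstripU, altTokens]
  | succ n ih =>
    intro l hl
    cases l with
    | nil =>
      constructor
      · simp [aRest, rstripU, altTokens, PySem.Chars.join, List.intercalate]
      · intro _; simp [aRest, rstripU, altTokens]
    | cons c cs =>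
      have hcs : cs.length ≤ n := by simpa using hl
      by_cases h : PySem.Chars.isalnum c
      · -- alnum head: peel the maximal run t, remainder u
        refine ⟨?_, fun hh => absurd h (by simpa [headNotAlnum] using hh)⟩
        set t := c :: cs.takeWhile PySem.Chars.isalnum with htdef
        set u := cs.dropWhile PySem.Chars.isalnum with hudef
        have htu : c :: cs = t ++ u := by
          simp [htdef, hudef, List.takeWhile_append_dropWhile]
        have hallt : ∀ x ∈ t, PySem.Chars.isalnum x = true := by
          intro x hx
          rcases List.mem_cons.mp hx with hx | hx
          · subst hx; exact h
          · exact List.mem_takeWhile_imp hx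
        have hu_head : headNotAlnum u := by
          rw [hudef]
          cases hud : cs.dropWhile PySem.Chars.isalnum with
          | nil => trivial
          | cons d ds =>
            have hne2 : cs.dropWhile PySem.Chars.isalnum ≠ [] := by rw [hud]; simp
            have h3 := List.head_dropWhile_not PySem.Chars.isalnum hne2
            have h4 : (cs.dropWhile PySem.Chars.isalnum).head hne2 = d := by
              simp only [hud, List.head_cons]
            rw [h4] at h3
            exact h3
        have hulen : u.length ≤ n := by
          have := List.length_dropWhile_le PySem.Chars.isalnum cs
          rw [hudef]; omega
        have ihu := (ih u hulen).2 hu_head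
        rw [htu, aRest_alnum_run t u hallt true (by simp [htdef]),
          rstripU_alnum_prepend t _ (by simp [htdef]) hallt, ihu]
        have htk : altTokens (c :: cs) = t :: altTokens u := by
          rw [altTokens]; simp [h, htdef, hudef]
        rw [← htu, htk, join_cons]
      · -- non-alnum head
        have ihcs := ih cs hcs
        have htk : altTokens (c :: cs) = altTokens cs := by rw [altTokens]; simp [h]
        constructor
        · rw [htk]
          simpa [aRest, h] using ihcs.1
        · intro _
          have : aRest false (c :: cs) = '_' :: aRest true cs := by simp [aRest, h]
          rw [this, rstripU_cons_underscore, ihcs.1, htk]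
          by_cases hempty : altTokens cs = []
          · simp [hempty]
          · have : PySem.Chars.join ['_'] (altTokens cs) ≠ [] :=
              fun hc => hempty ((join_eq_nil_iff cs).mp hc)
            simp [hempty, this]

theorem stripChars_aRest (s : List Char) :
    PySem.Chars.stripChars (aRest false s) ['_'] = PySem.Chars.join ['_'] (altTokens s) := by
  have h1 : PySem.Chars.stripChars (aRest false s) ['_'] =
      rstripU (List.dropWhile (fun c => List.contains ['_'] c) (aRest false s)) := by
    simp [PySem.Chars.stripChars, rstripU]
  rw [h1, ← dropU_aRest, dropU_aRest_true]
  exact (main_aux s.length s le_rfl).1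

-- ===== VERDICT (by name: the statement is the Claim_ definition above) =====
theorem memory_key_py_spec : Claim_equal_memory_key_py := by
  intro value _
  unfold Spec_memory_key_py memory_key_py memory_key_py_alt
  simp only [foldl_aRest, List.nil_append, stripChars_aRest]
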